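-- pv_equiv track=rewrite | github.com/philiplee13/DSA | DSA/ctci/strings.py | is_permutation_dictionaries
-- ===== SOURCE A (Python) =====
-- def is_permutation_dictionaries(x,y):
--     if len(x) != len(y):
--         return False
--     x_dict = {}
--     y_dict = {}
--     for char in x:
--         if char not in x_dict:
--             x_dict[char] = 1
--         else:
--             x_dict[char] += 1
--
--     for char in y:
--         if char not in y_dict:
--             y_dict[char] = 1
--         else:
--             y_dict[char] += 1
--
--     if x_dict != y_dict:
--         return False
--     return True
-- ===== SOURCE B (Python) =====
-- def is_permutation_dictionaries(x, y):
--     return sorted(x) == sorted(y)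
-- ===== Notes on version B (the rewrite author's own statement) =====
-- stated objective: simpler
-- what changed: Replaced the two dictionary-building frequency-count loops and the dict comparison with a one-line sort-and-compare: sorted(x) == sorted(y).
import Mathlib
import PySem

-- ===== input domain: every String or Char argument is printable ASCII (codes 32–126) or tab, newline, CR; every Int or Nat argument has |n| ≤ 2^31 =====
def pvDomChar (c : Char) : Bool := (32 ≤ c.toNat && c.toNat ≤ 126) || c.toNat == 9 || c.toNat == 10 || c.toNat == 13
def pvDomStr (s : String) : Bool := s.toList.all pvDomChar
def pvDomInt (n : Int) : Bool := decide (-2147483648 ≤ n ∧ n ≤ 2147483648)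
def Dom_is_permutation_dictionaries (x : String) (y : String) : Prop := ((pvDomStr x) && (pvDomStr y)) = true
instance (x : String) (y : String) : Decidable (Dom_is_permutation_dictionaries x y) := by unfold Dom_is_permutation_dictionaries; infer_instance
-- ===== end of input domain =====

-- B replaces A's two frequency-dictionary loops and dict comparison with sorted(x) == sorted(y); simpler, not faster.

-- ===== PORT A =====
-- the body of A's counting loops: if char not in d: d[char] = 1 else: d[char] += 1
def pyCountStep (d : PySem.Dict Char Int) (c : Char) : PySem.Dict Char Int :=
  if !(d.contains c) then d.insert c 1 else d.modify c 0 (· + 1)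

-- Python's dict == ignores insertion order: equal iff every key of either side has the same lookup
def pyDictEq (d1 d2 : PySem.Dict Char Int) : Bool :=
  d1.keys.all (fun k => d1.get? k == d2.get? k) && d2.keys.all (fun k => d1.get? k == d2.get? k)

def is_permutation_dictionaries (x : String) (y : String) : Bool :=
  if PySem.Str.len x ≠ PySem.Str.len y then false
  else
    let x_dict := x.toList.foldl pyCountStep PySem.Dict.empty
    let y_dict := y.toList.foldl pyCountStep PySem.Dict.empty
    if !(pyDictEq x_dict y_dict) then false else true

-- ===== PORT B =====
def is_permutation_dictionaries_alt (x : String) (y : String) : Bool :=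
  decide ((PySem.List.sorted x.toList (fun c => c)) = (PySem.List.sorted y.toList (fun c => c)))

-- ===== PRECONDITION & SPEC =====
def Spec_is_permutation_dictionaries (x : String) (y : String) (out : Bool) : Prop := out = is_permutation_dictionaries_alt x y
instance (x : String) (y : String) (out : Bool) : Decidable (Spec_is_permutation_dictionaries x y out) := by unfold Spec_is_permutation_dictionaries; infer_instance

-- ===== CLAIM (what is proved, stated in full; the proofs are below) =====
def Claim_equal_is_permutation_dictionaries : Prop := ∀ (x : String) (y : String), Dom_is_permutation_dictionaries x y → Spec_is_permutation_dictionaries x y (is_permutation_dictionaries x y)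

-- ===== LEMMAS AND PROOFS =====

-- A's loop body coincides with the Counter step (inserting 1 for a fresh key IS modify with default 0)
theorem pyCountStep_eq : pyCountStep = fun (d : PySem.Dict Char Int) c => d.modify c 0 (· + 1) := by
  funext d c
  unfold pyCountStep
  by_cases h : d.contains c = true
  · simp [h]
  · have h' : d.contains c = false := by simpa using h
    simp [h', PySem.Dict.modify, PySem.Dict.insert, PySem.Dict.getD_of_not_contains _ _ h']

theorem get?_counter_of_mem (xs : List Char) (c : Char) (h : c ∈ xs) :
    (PySem.Dict.counter xs).get? c = some (xs.count c : Int) := by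
  have h1 := PySem.Dict.getD_counter (κ := Char) xs c
  have h2 : (PySem.Dict.counter xs).contains c = true := by
    rw [PySem.Dict.contains_counter]; simp [h]
  rcases ho : (PySem.Dict.counter xs).get? c with _ | v
  · rw [PySem.Dict.contains_eq_isSome_get?, ho] at h2; simp at h2
  · have := PySem.Dict.getD_of_get?_eq_some (d := PySem.Dict.counter xs) (d0 := 0) ho
    rw [h1] at this; simp [this]

theorem get?_counter_of_not_mem (xs : List Char) (c : Char) (h : ¬ c ∈ xs) :
    (PySem.Dict.counter xs).get? c = none := by
  have h2 : (PySem.Dict.counter xs).contains c = false := by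
    rw [PySem.Dict.contains_counter]; simpa using h
  rcases ho : (PySem.Dict.counter xs).get? c with _ | v
  · rfl
  · rw [PySem.Dict.contains_eq_isSome_get?, ho] at h2; simp at h2

theorem get?_counter_eq_of_count (xs ys : List Char) (c : Char)
    (h : xs.count c = ys.count c) :
    (PySem.Dict.counter xs).get? c = (PySem.Dict.counter ys).get? c := by
  by_cases hx : c ∈ xs
  · have hy : c ∈ ys := by
      have : 0 < ys.count c := h ▸ List.count_pos_iff.mpr hx
      exact List.count_pos_iff.mp this
    rw [get?_counter_of_mem xs c hx, get?_counter_of_mem ys c hy, h]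
  · have hy : ¬ c ∈ ys := by
      intro hm
      have : 0 < xs.count c := h ▸ List.count_pos_iff.mpr hm
      exact hx (List.count_pos_iff.mp this)
    rw [get?_counter_of_not_mem xs c hx, get?_counter_of_not_mem ys c hy]

theorem count_eq_of_get?_counter (xs ys : List Char) (c : Char)
    (h : (PySem.Dict.counter xs).get? c = (PySem.Dict.counter ys).get? c) :
    xs.count c = ys.count c := by
  have := congrArg (fun o => o.getD (0 : Int)) h
  simp only [← PySem.Dict.getD_eq_get?_getD, PySem.Dict.getD_counter] at this
  exact_mod_cast this

theorem pyDictEq_counter_iff (xs ys : List Char) :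
    pyDictEq (PySem.Dict.counter xs) (PySem.Dict.counter ys) = true ↔ xs.Perm ys := by
  unfold pyDictEq
  rw [List.perm_iff_count]
  simp only [Bool.and_eq_true, List.all_eq_true, PySem.Dict.keys_counter, PySem.Set.mem_ofList,
    beq_iff_eq]
  constructor
  · rintro ⟨h1, h2⟩ c
    by_cases hx : c ∈ xs
    · exact count_eq_of_get?_counter xs ys c (h1 c hx)
    · by_cases hy : c ∈ ys
      · exact count_eq_of_get?_counter xs ys c (h2 c hy)
      · rw [List.count_eq_zero.mpr hx, List.count_eq_zero.mpr hy]
  · intro h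
    exact ⟨fun c _ => get?_counter_eq_of_count xs ys c (h c),
           fun c _ => get?_counter_eq_of_count xs ys c (h c)⟩

-- ===== VERDICT (by name: the statement is the Claim_ definition above) =====
theorem is_permutation_dictionaries_spec : Claim_equal_is_permutation_dictionaries := by
  intro x y _
  unfold Spec_is_permutation_dictionaries is_permutation_dictionaries is_permutation_dictionaries_alt
  rw [pyCountStep_eq, ← PySem.Dict.counter_eq_foldl, ← PySem.Dict.counter_eq_foldl]
  rw [Bool.eq_iff_iff]
  rw [decide_eq_true_iff, PySem.List.sorted_id_eq_sorted_id_iff_perm]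
  by_cases hlen : PySem.Str.len x ≠ PySem.Str.len y
  · rw [if_pos hlen]
    simp only [Bool.false_eq_true, false_iff]
    intro hperm
    exact hlen (by rw [PySem.Str.len_eq, PySem.Str.len_eq, hperm.length_eq])
  · rw [if_neg hlen]
    rw [← pyDictEq_counter_iff]
    cases h : pyDictEq (PySem.Dict.counter x.toList) (PySem.Dict.counter y.toList) <;> simp [h]
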